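-- pv_equiv track=rewrite | github.com/smsxgz/euler_project | problem_561/Divisor_Pairs.py | f
-- ===== SOURCE A (Python) =====
-- def f(m):
--     i = 0
--     while 1:
--         if m % 2 == 0:
--             m = m // 2
--             i += 1
--         else:
--             break
--     return i
-- ===== SOURCE B (Python) =====
-- def f(m):
--     return (m & -m).bit_length() - 1
-- ===== Notes on version B (the rewrite author's own statement) =====
-- stated objective: simpler
-- what changed: Replaces the trial-division loop with the closed-form bit trick: isolate the lowest set bit of m and read off its position via bit_length; no loop or accumulator remains (O(1) word ops, though too fast here for a timing run to resolve).
-- outside the precondition, e.g. on f(0): A does not finish within the time limit, B returns -1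
import Mathlib
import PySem

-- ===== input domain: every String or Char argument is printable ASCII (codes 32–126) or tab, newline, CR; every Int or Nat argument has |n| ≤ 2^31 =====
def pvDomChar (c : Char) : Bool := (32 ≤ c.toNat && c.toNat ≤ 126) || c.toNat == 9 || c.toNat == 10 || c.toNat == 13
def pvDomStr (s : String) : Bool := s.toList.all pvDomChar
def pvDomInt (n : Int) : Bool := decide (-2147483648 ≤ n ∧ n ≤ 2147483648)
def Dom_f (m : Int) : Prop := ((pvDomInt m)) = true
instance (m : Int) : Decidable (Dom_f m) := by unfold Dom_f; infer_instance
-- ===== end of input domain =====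

-- B replaces A's trial-division loop with the closed-form bit trick (isolate the lowest set bit of m, read off its position): no loop, one expression.
-- Pre_f excludes m = 0, on which A's while-loop never terminates (A diverges, returns nothing).


-- ===== PORT A =====
-- the while-loop, with fuel m.natAbs (enough for any m ≠ 0: the loop runs at most
-- v₂(m) + 1 ≤ |m| iterations); each step mirrors A's body exactly
def fLoop : Nat → Int → Int → Int
  | 0, _, i => i
  | fuel + 1, m, i =>
      if PySem.Int.mod m 2 = 0 then fLoop fuel (PySem.Int.floordiv m 2) (i + 1) else i

def f (m : Int) : Int := fLoop m.natAbs m 0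

-- ===== PORT B =====
def f_alt (m : Int) : Int := (PySem.Int.bitLength (PySem.Int.band m (-m)) : Int) - 1

-- ===== PRECONDITION & SPEC =====
-- Pre_f excludes exactly m = 0, where A's `while 1` loop never breaks (A diverges).
def Pre_f (m : Int) : Prop := m ≠ 0
instance (m : Int) : Decidable (Pre_f m) := by unfold Pre_f; infer_instance
def pvWitness_f : Int := (12)

def Spec_f (m : Int) (out : Int) : Prop := out = f_alt m
instance (m : Int) (out : Int) : Decidable (Spec_f m out) := by unfold Spec_f; infer_instance

-- ===== CLAIM (what is proved, stated in full; the proofs are below) =====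
def Claim_equal_f : Prop := ∀ (m : Int), Dom_f m → Pre_f m → Spec_f m (f m)

-- ===== LEMMAS AND PROOFS =====

-- (2c+1) &&& (2c) = 2c : an odd number ANDed with its predecessor keeps exactly the even part
theorem nat_odd_and (c : Nat) : (2 * c + 1) &&& (2 * c) = 2 * c := by
  apply Nat.eq_of_testBit_eq
  intro i
  cases i with
  | zero => simp [Nat.testBit_zero, Nat.mul_mod_right]
  | succ j =>
      rw [Nat.testBit_and]
      simp only [Nat.testBit_succ]
      have h1 : (2 * c + 1) / 2 = c := by omega
      have h2 : (2 * c) / 2 = c := by omega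
      rw [h1, h2]
      simp

-- (2c) &&& (2c-1) = 2·(c &&& (c-1)) for c ≥ 1
theorem nat_even_and (c : Nat) (hc : 1 ≤ c) :
    (2 * c) &&& (2 * c - 1) = 2 * (c &&& (c - 1)) := by
  have he : 2 * c - 1 = 2 * (c - 1) + 1 := by omega
  rw [he]
  apply Nat.eq_of_testBit_eq
  intro i
  cases i with
  | zero => simp [Nat.testBit_zero, Nat.mul_mod_right]
  | succ j =>
      rw [Nat.testBit_and]
      simp only [Nat.testBit_succ]
      have h1 : (2 * c) / 2 = c := by omega
      have h2 : (2 * (c - 1) + 1) / 2 = c - 1 := by omega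
      have h3 : (2 * (c &&& (c - 1))) / 2 = c &&& (c - 1) := by omega
      rw [h1, h2, h3, Nat.testBit_and]

-- master induction: for m ≠ 0 with |m| ≤ k, the lowest-set-bit value n - (n &&& (n-1))
-- of n = |m| is a power 2^v, and A's loop returns i + v
theorem master : ∀ (k : Nat) (m : Int), m ≠ 0 → m.natAbs ≤ k →
    ∃ v : Nat, m.natAbs - (m.natAbs &&& (m.natAbs - 1)) = 2 ^ v ∧
      ∀ i : Int, fLoop k m i = i + (v : Int) := by
  intro k
  induction k with
  | zero => intro m hm hk; omega
  | succ k ih =>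
      intro m hm hk
      have hmod : PySem.Int.mod m 2 = m % 2 := PySem.Int.mod_eq_emod_of_pos (by omega)
      by_cases hpar : m % 2 = 0
      · -- even: recurse on m / 2
        obtain ⟨w, hw⟩ : ∃ w : Int, m = 2 * w := ⟨m / 2, by omega⟩
        have hw0 : w ≠ 0 := by omega
        have hdiv : PySem.Int.floordiv m 2 = w := by
          rw [PySem.Int.floordiv_eq_ediv_of_pos (by omega)]; omega
        obtain ⟨v, hv1, hv2⟩ := ih w hw0 (by omega)
        refine ⟨v + 1, ?_, ?_⟩
        · have hna : m.natAbs = 2 * w.natAbs := by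
            simp [hw, Int.natAbs_mul]
          have hwa : 1 ≤ w.natAbs := by omega
          rw [hna, nat_even_and _ hwa]
          have hle : w.natAbs &&& (w.natAbs - 1) ≤ w.natAbs := Nat.and_le_left
          have : 2 * (w.natAbs - (w.natAbs &&& (w.natAbs - 1))) = 2 * 2 ^ v := by omega
          calc 2 * w.natAbs - 2 * (w.natAbs &&& (w.natAbs - 1))
              = 2 * (w.natAbs - (w.natAbs &&& (w.natAbs - 1))) := by omega
            _ = 2 ^ (v + 1) := by rw [hv1]; ring
        · intro i
          show (if PySem.Int.mod m 2 = 0 then fLoop k (PySem.Int.floordiv m 2) (i + 1) else i)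
              = i + ((v : Int) + 1)
          rw [if_pos (by rw [hmod]; exact hpar), hdiv, hv2 (i + 1)]
          ring
      · -- odd: the loop breaks immediately, and n - (n &&& (n-1)) = 1
        have h1 : m % 2 = 1 := by omega
        refine ⟨0, ?_, ?_⟩
        · have hodd : m.natAbs % 2 = 1 := by omega
          obtain ⟨c, hc⟩ : ∃ c : Nat, m.natAbs = 2 * c + 1 := ⟨m.natAbs / 2, by omega⟩
          rw [hc]
          have : 2 * c + 1 - 1 = 2 * c := by omega
          rw [this, nat_odd_and]
          omega
        · intro i
          show (if PySem.Int.mod m 2 = 0 then fLoop k (PySem.Int.floordiv m 2) (i + 1) else i)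
              = i + ((0 : Nat) : Int)
          rw [if_neg (by rw [hmod]; omega)]
          simp

-- m & -m, computed by PySem.Int.band, equals the Nat value n - (n &&& (n-1)) for n = |m|
theorem band_self_neg (m : Int) (hm : m ≠ 0) :
    PySem.Int.band m (-m) = ((m.natAbs - (m.natAbs &&& (m.natAbs - 1)) : Nat) : Int) := by
  unfold PySem.Int.band
  rcases lt_or_gt_of_ne hm with hneg | hpos
  · rw [if_neg (by omega), if_pos (by omega)]
    have h1 : (-m).toNat = m.natAbs := by omega
    have h2 : (-m - 1).toNat = m.natAbs - 1 := by omega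
    rw [h1, h2]
  · rw [if_pos (by omega), if_neg (by omega)]
    have h1 : m.toNat = m.natAbs := by omega
    have h2 : (- -m - 1).toNat = m.natAbs - 1 := by omega
    rw [h1, h2]

-- bitLength of a power of two read back: bitLength (2^v : Nat) = v + 1
theorem bitLength_two_pow (v : Nat) : PySem.Int.bitLength ((2 ^ v : Nat) : Int) = v + 1 := by
  set L := PySem.Int.bitLength ((2 ^ v : Nat) : Int) with hL
  have hne : ((2 ^ v : Nat) : Int) ≠ 0 := by positivity
  have hlo := PySem.Int.two_pow_bitLength_le ((2 ^ v : Nat) : Int) hne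
  have hhi := PySem.Int.lt_two_pow_bitLength ((2 ^ v : Nat) : Int)
  rw [← hL] at hlo hhi
  have hna : (((2 ^ v : Nat) : Int)).natAbs = 2 ^ v := Int.natAbs_natCast _
  rw [hna] at hlo hhi
  -- 2^(L-1) ≤ 2^v < 2^L  forces L = v + 1
  have hvL : v < L := (Nat.pow_lt_pow_iff_right (by omega)).mp hhi
  have hLv : L - 1 ≤ v := by
    by_contra hcon
    have : 2 ^ v < 2 ^ (L - 1) := Nat.pow_lt_pow_right (by omega) (by omega)
    omega
  omega

-- ===== VERDICT (by name: the statement is the Claim_ definition above) =====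
theorem f_spec : Claim_equal_f := by
  intro m _ hpre
  obtain ⟨v, hv1, hv2⟩ := master m.natAbs m hpre le_rfl
  show f m = f_alt m
  unfold f f_alt
  rw [hv2 0, band_self_neg m hpre, hv1, bitLength_two_pow]
  push_cast
  ring
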